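-- pv_equiv track=rewrite | github.com/angyay0/cocoa-truffle | app.py | _default_pegs
-- ===== SOURCE A (Python) =====
-- import string
--
-- def _default_pegs(k: int):
--     """Genera etiquetas por defecto: A, B, C, D, ..., Z, A1, B1, ... si no se especifica en el parametro."""
--     base = list(string.ascii_uppercase)
--     labels = []
--     i = 0
--     while len(labels) < k:
--         if i < 26:
--             labels.append(base[i])
--         else:
--             labels.append(base[i % 26] + str(i // 26))
--         i += 1
--     return labels
-- ===== SOURCE B (Python) =====
-- import string
--
-- def _default_pegs(k: int):
--     """Genera etiquetas por defecto: A, B, C, ..., Z, A1, B1, ... (block-structured)."""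
--     labels = []
--     suffix = 0
--     while len(labels) < k:
--         for letter in string.ascii_uppercase:
--             if len(labels) >= k:
--                 break
--             labels.append(letter + ('' if suffix == 0 else str(suffix)))
--         suffix += 1
--     return labels
-- ===== Notes on version B (the rewrite author's own statement) =====
-- stated objective: alternative
-- what changed: Replaces the single flat index loop with modulo/floor-division arithmetic by nested loops: an outer suffix counter over blocks and an inner pass over the uppercase letters, deriving each label from its block position instead of index arithmetic.
import Mathlib
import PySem

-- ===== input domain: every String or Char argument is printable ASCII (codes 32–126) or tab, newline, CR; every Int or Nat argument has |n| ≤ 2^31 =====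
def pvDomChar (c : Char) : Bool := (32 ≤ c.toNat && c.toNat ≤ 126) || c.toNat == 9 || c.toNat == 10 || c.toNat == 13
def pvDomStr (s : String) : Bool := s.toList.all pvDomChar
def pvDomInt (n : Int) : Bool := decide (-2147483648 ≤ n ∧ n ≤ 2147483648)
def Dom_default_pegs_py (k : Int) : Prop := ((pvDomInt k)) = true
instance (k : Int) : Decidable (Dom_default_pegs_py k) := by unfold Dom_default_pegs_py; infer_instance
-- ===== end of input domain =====

-- B reorganises the iteration: an outer suffix counter over blocks of 26 letters instead of
-- a flat index with i%26 / i//26 arithmetic; same O(k) cost (objective: alternative).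

-- string.ascii_uppercase as a list of one-character strings (Python iterates / indexes it that way)
def pvAsciiUpper : List String :=
  ["A","B","C","D","E","F","G","H","I","J","K","L","M",
   "N","O","P","Q","R","S","T","U","V","W","X","Y","Z"]

-- Python's str '+' (concatenation), exact: ported by hand over the character lists
def pvStrAdd (a b : String) : String := String.ofList (a.toList ++ b.toList)

-- ===== PORT A =====
-- while len(labels) < k: each iteration appends one label, so k.toNat iterations suffice (fuel)
def pvALoop (k : Int) (fuel : Nat) (i : Int) (labels : List String) : List String :=
  match fuel with
  | 0 => labels
  | f+1 =>
    if (labels.length : Int) < k then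
      let lbl := if i < 26 then PySem.List.pyGetD pvAsciiUpper i ""
        else pvStrAdd (PySem.List.pyGetD pvAsciiUpper (PySem.Int.mod i 26) "")
                      (PySem.Int.toStr (PySem.Int.floordiv i 26))
      pvALoop k f (i+1) (labels ++ [lbl])
    else labels

def default_pegs_py (k : Int) : List String := pvALoop k k.toNat 0 []

-- ===== PORT B =====
-- inner 'for letter in string.ascii_uppercase' with break (break ported as skipping the rest)
def pvBInner (k : Int) (suffix : Int) (labels : List String) : List String :=
  pvAsciiUpper.foldl (fun acc letter =>
    if (acc.length : Int) ≥ k then acc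
    else acc ++ [pvStrAdd letter (if suffix == 0 then "" else PySem.Int.toStr suffix)]) labels

-- outer 'while len(labels) < k': each entered pass appends at least one label, fuel k.toNat suffices
def pvBOuter (k : Int) (fuel : Nat) (suffix : Int) (labels : List String) : List String :=
  match fuel with
  | 0 => labels
  | f+1 =>
    if (labels.length : Int) < k then pvBOuter k f (suffix + 1) (pvBInner k suffix labels)
    else labels

def default_pegs_py_alt (k : Int) : List String := pvBOuter k k.toNat 0 []

-- ===== PRECONDITION & SPEC =====
def Spec_default_pegs_py (k : Int) (out : List String) : Prop := out = default_pegs_py_alt k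
instance (k : Int) (out : List String) : Decidable (Spec_default_pegs_py k out) := by unfold Spec_default_pegs_py; infer_instance

-- ===== CLAIM (what is proved, stated in full; the proofs are below) =====
def Claim_equal_default_pegs_py : Prop := ∀ (k : Int), Dom_default_pegs_py k → Spec_default_pegs_py k (default_pegs_py k)

-- ===== LEMMAS AND PROOFS =====

-- canonical label of index i, used only by the proofs
def pvCanon (i : Nat) : String :=
  if i < 26 then pvAsciiUpper.getD (i % 26) ""
  else pvStrAdd (pvAsciiUpper.getD (i % 26) "") (PySem.Int.toStr ((i / 26 : Nat) : Int))

theorem pvStrAdd_empty (a : String) : pvStrAdd a "" = a := by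
  simp [pvStrAdd]

theorem pvALoop_eq (k : Int) (n : Nat) : ∀ (start : Nat) (acc : List String),
    acc.length = start → start + n = k.toNat →
    pvALoop k n (start : Int) acc = acc ++ (List.range n).map (fun j => pvCanon (start + j)) := by
  induction n with
  | zero => intro start acc _ _; simp [pvALoop]
  | succ f ih =>
    intro start acc hlen hk
    have hklt : (acc.length : Int) < k := by
      rw [hlen]; omega
    have hlbl : (if (start : Int) < 26 then PySem.List.pyGetD pvAsciiUpper (start : Int) ""
        else pvStrAdd (PySem.List.pyGetD pvAsciiUpper (PySem.Int.mod (start : Int) 26) "")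
                      (PySem.Int.toStr (PySem.Int.floordiv (start : Int) 26))) = pvCanon start := by
      have hmod : PySem.Int.mod (start : Int) 26 = ((start % 26 : Nat) : Int) := by
        exact_mod_cast PySem.Int.mod_natCast start 26
      have hdiv : PySem.Int.floordiv (start : Int) 26 = ((start / 26 : Nat) : Int) := by
        exact_mod_cast PySem.Int.floordiv_natCast start 26
      by_cases h : start < 26
      · have : ((start : Int) < 26) := by exact_mod_cast h
        simp [pvCanon, h, this, Nat.mod_eq_of_lt h]
      · have h2 : ¬ ((start : Int) < 26) := by omega
        rw [if_neg h2, hmod, hdiv]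
        simp only [pvCanon, if_neg h, PySem.List.pyGetD_natCast]
    rw [pvALoop]
    simp only [hklt, if_pos]
    rw [hlbl]
    have : ((start : Int) + 1) = ((start + 1 : Nat) : Int) := by push_cast; ring
    rw [this, ih (start + 1) (acc ++ [pvCanon start]) (by simp [hlen]) (by omega)]
    rw [List.range_succ_eq_map]
    simp [List.map_map, Function.comp, Nat.add_comm, Nat.add_left_comm]

-- inner pass: appends the first (k - len) letters of the block (clamped), with suffix s
theorem pvBInner_gen (k : Int) (s : Int) (letters : List String) : ∀ (acc : List String),
    letters.foldl (fun acc letter =>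
      if (acc.length : Int) ≥ k then acc
      else acc ++ [pvStrAdd letter (if s == 0 then "" else PySem.Int.toStr s)]) acc
    = acc ++ (letters.take (k - acc.length).toNat).map
        (fun l => pvStrAdd l (if s == 0 then "" else PySem.Int.toStr s)) := by
  induction letters with
  | nil => intro acc; simp
  | cons l ls ih =>
    intro acc
    by_cases h : (acc.length : Int) ≥ k
    · have ht : (k - acc.length).toNat = 0 := by omega
      simp only [List.foldl_cons, if_pos h, ih acc, ht, List.take_zero]
    · have ht : (k - acc.length).toNat = (k - (acc.length + 1)).toNat + 1 := by omega
      simp only [List.foldl_cons, if_neg h, ih]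
      rw [ht, List.take_succ_cons]
      simp [List.append_assoc]

-- one block of B's labels is the canonical labels for indices 26*s .. 26*s + min t 26
theorem pvBlock_eq (s : Nat) (t : Nat) :
    (pvAsciiUpper.take t).map
        (fun l => pvStrAdd l (if (s : Int) == 0 then "" else PySem.Int.toStr (s : Int)))
    = (List.range (min t 26)).map (fun j => pvCanon (26 * s + j)) := by
  apply List.ext_getElem
  · simp [pvAsciiUpper]
  · intro j h1 h2
    have hj : j < 26 := by
      simp [pvAsciiUpper] at h1; omega
    have hjt : j < t := by
      simp [pvAsciiUpper] at h1; omega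
    have hmod : (26 * s + j) % 26 = j := by omega
    have hdiv : (26 * s + j) / 26 = s := by omega
    simp only [List.getElem_map, List.getElem_take, List.getElem_range]
    have hlen26 : j < pvAsciiUpper.length := by simp [pvAsciiUpper]; omega
    by_cases hs : s = 0
    · subst hs
      simp [pvCanon] ; simp [hj, pvStrAdd_empty, Nat.mod_eq_of_lt hj,
        List.getElem?_eq_getElem hlen26]
    · have hge : ¬ (26 * s + j < 26) := by omega
      have hs' : ¬ ((s : Int) == 0) = true := by simp; omega
      simp [pvCanon, hge, hmod, hdiv, hs', List.getD_eq_getElem?_getD,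
        List.getElem?_eq_getElem hlen26]

theorem pvBOuter_eq (k : Int) : ∀ (fuel s : Nat), k.toNat ≤ 26 * s + fuel →
    pvBOuter k fuel (s : Int) ((List.range (min (26 * s) k.toNat)).map pvCanon)
    = (List.range k.toNat).map pvCanon := by
  intro fuel
  induction fuel with
  | zero =>
    intro s h
    have : min (26 * s) k.toNat = k.toNat := by omega
    simp [pvBOuter, this]
  | succ f ih =>
    intro s h
    by_cases hfull : k.toNat ≤ 26 * s
    · have hmin : min (26 * s) k.toNat = k.toNat := by omega
      have hcond : ¬ ((((List.range (min (26 * s) k.toNat)).map pvCanon).length : Int) < k) := by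
        simp only [List.length_map, List.length_range, hmin]; omega
      rw [pvBOuter, if_neg hcond, hmin]
    · -- a full or final partial block is appended
      have hL : min (26 * s) k.toNat = 26 * s := by omega
      have hcond : ((((List.range (min (26 * s) k.toNat)).map pvCanon).length : Int) < k) := by
        simp only [List.length_map, List.length_range, hL]; omega
      rw [pvBOuter, if_pos hcond]
      have hinner : pvBInner k (s : Int) ((List.range (min (26 * s) k.toNat)).map pvCanon)
          = (List.range (min (26 * (s + 1)) k.toNat)).map pvCanon := by
        rw [pvBInner, pvBInner_gen, hL]
        have hlen : (((List.range (26 * s)).map pvCanon).length : Int) = (26 * s : Nat) := by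
          simp
        rw [hlen]
        have ht : (k - ((26 * s : Nat) : Int)).toNat = k.toNat - 26 * s := by omega
        rw [ht, pvBlock_eq s (k.toNat - 26 * s)]
        have hm : min (26 * (s + 1)) k.toNat = 26 * s + min (k.toNat - 26 * s) 26 := by omega
        rw [hm, List.range_add, List.map_append, List.map_map]
        rfl
      rw [hinner]
      have hs1 : ((s : Int) + 1) = (((s + 1 : Nat)) : Int) := by push_cast; ring
      rw [hs1, ih (s + 1) (by omega)]

-- ===== VERDICT (by name: the statement is the Claim_ definition above) =====
theorem default_pegs_py_spec : Claim_equal_default_pegs_py := by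
  intro k _
  show default_pegs_py k = default_pegs_py_alt k
  have hA : default_pegs_py k = (List.range k.toNat).map pvCanon := by
    have := pvALoop_eq k k.toNat 0 [] rfl (by omega)
    simpa [default_pegs_py] using this
  have hB : default_pegs_py_alt k = (List.range k.toNat).map pvCanon := by
    have := pvBOuter_eq k k.toNat 0 (by omega)
    simpa [default_pegs_py_alt] using this
  rw [hA, hB]
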